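-- pv_equiv track=rewrite | github.com/calvincarja/python-small-projects | birthday-paradox-game.py | find_shared_bday
-- ===== SOURCE A (Python) =====
-- def find_shared_bday(random_list): # passing random_list will keep the list generated in the above
--     birth_month_day = {} # will store the key:value pairs
--     for month, day in random_list:
--         birth_month_day[month, day] = birth_month_day.get((month, day), 0) + 1 # stores tuples in dictionary
--     shared_birthday = False # created varible to avoid having return statements inside my for loop
--     bday_key_set = set()
--     for key, value in birth_month_day.items(): # key == (month, day) tuple, value == the count for each tuple, .items() is view-object of the key:value pair within the dictionary
--         if value > 1:
--             shared_birthday = True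
--             bday_key_set.add(key)
--             break # stops loop after first shared bday is found
--     return shared_birthday, bday_key_set
-- ===== SOURCE B (Python) =====
-- def find_shared_bday(random_list):
--     for month, day in random_list:
--         cnt = 0
--         for m, d in random_list:
--             if m == month and d == day:
--                 cnt += 1
--         if cnt > 1:
--             return True, {(month, day)}
--     return False, set()
-- ===== Notes on version B (the rewrite author's own statement) =====
-- stated objective: simpler
-- what changed: B drops A's frequency dictionary entirely: it scans the list in order and, for each pair, re-counts its occurrences over the whole list with an inner loop, returning at the first pair whose count exceeds 1; A instead first builds a counter dict and then scans the dict's items.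
import Mathlib
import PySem

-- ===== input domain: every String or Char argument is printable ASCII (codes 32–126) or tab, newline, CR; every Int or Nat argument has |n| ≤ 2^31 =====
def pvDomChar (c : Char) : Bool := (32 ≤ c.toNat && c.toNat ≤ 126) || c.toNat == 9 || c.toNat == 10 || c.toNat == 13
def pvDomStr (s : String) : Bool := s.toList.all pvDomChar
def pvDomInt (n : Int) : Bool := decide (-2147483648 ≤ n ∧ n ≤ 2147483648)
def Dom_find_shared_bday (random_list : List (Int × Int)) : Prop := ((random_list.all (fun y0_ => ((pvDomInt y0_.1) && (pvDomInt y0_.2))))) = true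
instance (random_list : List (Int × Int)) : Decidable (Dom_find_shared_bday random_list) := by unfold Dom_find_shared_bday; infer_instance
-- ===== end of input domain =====

-- B replaces A's build-a-frequency-dict-then-scan-items with a single in-order scan that
-- re-counts the current pair over the whole list and stops at the first duplicated pair
-- (simpler: no table is built).

-- ===== PORT A =====
-- second loop of A: iterate the dict's items, stop at the first value > 1
def pvScanItemsA : List ((Int × Int) × Int) → Bool × (List (Int × Int))
  | [] => (false, PySem.Set.empty)
  | (key, value) :: rest =>
      if value > 1 then (true, PySem.Set.add PySem.Set.empty key)
      else pvScanItemsA rest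

def find_shared_bday (random_list : List (Int × Int)) : Bool × (List (Int × Int)) :=
  let birth_month_day : PySem.Dict (Int × Int) Int :=
    random_list.foldl (fun d p => d.insert p (d.getD p 0 + 1)) PySem.Dict.empty
  pvScanItemsA birth_month_day.items

-- ===== PORT B =====
-- B's outer loop: for each pair in order, count it over the whole list (inner loop), stop if > 1
def pvScanB (random_list : List (Int × Int)) : List (Int × Int) → Bool × (List (Int × Int))
  | [] => (false, PySem.Set.empty)
  | (month, day) :: rest =>
      let cnt : Int := random_list.foldl
        (fun c p => if p.1 == month && p.2 == day then c + 1 else c) 0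
      if cnt > 1 then (true, PySem.Set.add PySem.Set.empty (month, day))
      else pvScanB random_list rest

def find_shared_bday_alt (random_list : List (Int × Int)) : Bool × (List (Int × Int)) :=
  pvScanB random_list random_list

-- ===== PRECONDITION & SPEC =====
def Spec_find_shared_bday (random_list : List (Int × Int)) (out : Bool × (List (Int × Int))) : Prop := out = find_shared_bday_alt random_list
instance (random_list : List (Int × Int)) (out : Bool × (List (Int × Int))) : Decidable (Spec_find_shared_bday random_list out) := by unfold Spec_find_shared_bday; infer_instance

-- ===== CLAIM (what is proved, stated in full; the proofs are below) =====
def Claim_equal_find_shared_bday : Prop := ∀ (random_list : List (Int × Int)), Dom_find_shared_bday random_list → Spec_find_shared_bday random_list (find_shared_bday random_list)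

-- ===== LEMMAS AND PROOFS =====

-- B's inner count loop is List.count
theorem pvCntB_eq_count (xs : List (Int × Int)) (m d : Int) :
    xs.foldl (fun c p => if p.1 == m && p.2 == d then c + 1 else c) (0 : Int)
      = (xs.count (m, d) : Int) := by
  have h := PySem.List.foldl_count_if (fun p : Int × Int => p.1 == m && p.2 == d) xs 0
  rw [h]
  simp only [List.count_eq_countP, zero_add, Int.natCast_inj]
  congr 1

-- both scans reduce to find? of "count in random_list > 1"
theorem pvScanB_eq_find (rl : List (Int × Int)) (xs : List (Int × Int)) :
    pvScanB rl xs =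
      match xs.find? (fun k => decide (1 < rl.count k)) with
      | some k => (true, [k])
      | none => (false, []) := by
  induction xs with
  | nil => simp [pvScanB, PySem.Set.empty]
  | cons x xs ih =>
    rcases x with ⟨m, d⟩
    have hc := pvCntB_eq_count rl m d
    by_cases h : 1 < rl.count (m, d)
    · have hI : (1 : Int) < (rl.count (m, d) : Int) := by exact_mod_cast h
      simp only [pvScanB]
      rw [hc]
      simp [hI, h, PySem.Set.add, PySem.Set.empty, PySem.Set.contains]
    · have hI : ¬ (1 : Int) < (rl.count (m, d) : Int) := by exact_mod_cast h
      simp only [pvScanB]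
      rw [hc]
      simp [hI, h, ih]

theorem pvScanItemsA_map (rl : List (Int × Int)) (ks : List (Int × Int)) :
    pvScanItemsA (ks.map (fun k => (k, (rl.count k : Int)))) =
      match ks.find? (fun k => decide (1 < rl.count k)) with
      | some k => (true, [k])
      | none => (false, []) := by
  induction ks with
  | nil => simp [pvScanItemsA, PySem.Set.empty]
  | cons k ks ih =>
    by_cases h : 1 < rl.count k
    · have hI : (1 : Int) < (rl.count k : Int) := by exact_mod_cast h
      simp [pvScanItemsA, hI, h, PySem.Set.add,
        PySem.Set.empty, PySem.Set.contains]
    · have hI : ¬ (1 : Int) < (rl.count k : Int) := by exact_mod_cast h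
      simp [pvScanItemsA, hI, h, ih]

-- find? over a Set.add fold: the accumulated set is a prefix, new elements follow in first-occurrence order
theorem pvFind_foldl_add (p : Int × Int → Bool) :
    ∀ (xs : List (Int × Int)) (s : PySem.Set (Int × Int)),
      (xs.foldl PySem.Set.add s).find? p = (s.find? p).or (xs.find? p) := by
  intro xs
  induction xs with
  | nil => intro s; simp
  | cons x xs ih =>
    intro s
    rw [List.foldl_cons, ih]
    by_cases hmem : PySem.Set.contains s x = true
    · have hx : x ∈ s := by simp [PySem.Set.contains] at hmem; exact hmem
      have hadd : PySem.Set.add s x = s := by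
        simp [PySem.Set.add, PySem.Set.contains, hx]
      rw [hadd, List.find?_cons]
      cases hfs : s.find? p with
      | some k => simp
      | none =>
        have hall := List.find?_eq_none.mp hfs
        have hpx : ¬ p x = true := hall x hx
        simp [hpx]
    · have hx : x ∉ s := by simp [PySem.Set.contains] at hmem; exact hmem
      have hadd : PySem.Set.add s x = s ++ [x] := by
        simp [PySem.Set.add, PySem.Set.contains, hx]
      rw [hadd, List.find?_append, List.find?_cons]
      cases hfs : s.find? p with
      | some k => simp
      | none =>
        by_cases hp : p x = true
        · simp [hp]
        · simp [hp]

theorem pvFind_ofList (p : Int × Int → Bool) (xs : List (Int × Int)) :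
    (PySem.Set.ofList xs).find? p = xs.find? p := by
  rw [PySem.Set.ofList_eq_foldl, pvFind_foldl_add]
  simp

-- ===== VERDICT (by name: the statement is the Claim_ definition above) =====
theorem find_shared_bday_spec : Claim_equal_find_shared_bday := by
  unfold Claim_equal_find_shared_bday
  intro rl _
  unfold Spec_find_shared_bday find_shared_bday find_shared_bday_alt
  change pvScanItemsA (PySem.Dict.counter rl).items = pvScanB rl rl
  rw [PySem.Dict.items_counter, pvScanItemsA_map, pvScanB_eq_find, pvFind_ofList]
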